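-- pv_equiv track=rewrite | github.com/DJC-GO-SOLO/Latent-SFT | src/stage1/data.py | compute_dual_track_position_ids
-- ===== SOURCE A (Python) =====
-- def compute_dual_track_position_ids(input_ids, special_id=-100):
--     """
--     Compute dual-track position IDs for latent token training.
--
--     Latent tokens (-100) get consecutive positions (as if text spacers don't exist).
--     Text spacers within each segment continue incrementally from their latent token's position.
--     After all latent tokens, positions continue normally from the last latent position.
--
--     Example:
--       input:    [P0, P1, <t>, L1, t1, t2, L2, t3, t4, L3, </t>, A1, A2]
--       pos_ids:  [0,  1,  2,   3,  4,  5,  4,  5,  6,  5,   6,   7,  8]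
--     """
--     seq_len = len(input_ids)
--     position_ids = list(range(seq_len))  # Default: normal positions
--
--     # Find all latent token positions (-100)
--     latent_positions = [i for i, tok in enumerate(input_ids) if tok == special_id]
--
--     if not latent_positions:
--         return position_ids  # No latent tokens, use default
--
--     first_latent_idx = latent_positions[0]
--
--     # The base position is the position of the token right before the first latent token
--     # Since prefix uses normal positions (0, 1, ..., first_latent_idx-1),
--     # the base is first_latent_idx - 1
--     latent_base = first_latent_idx - 1
--
--     # Prefix positions stay unchanged (already correct from initialization)
--
--     latent_count = 0
--     current_pos = latent_base
--
--     for i in range(first_latent_idx, seq_len):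
--         if input_ids[i] == special_id:
--             # Latent token: assign next consecutive latent position
--             latent_count += 1
--             pos = latent_base + latent_count
--             position_ids[i] = pos
--             current_pos = pos  # Reset segment tracker to this latent position
--         else:
--             # Text spacer or post-latent token: continue incrementally
--             current_pos += 1
--             position_ids[i] = current_pos
--
--     return position_ids
-- ===== SOURCE B (Python) =====
-- def compute_dual_track_position_ids(input_ids, special_id=-100):
--     """Segment-based reconstruction: build the output by concatenating ranges,
--     one per latent segment, instead of walking every token with a running counter."""
--     n = len(input_ids)
--     latents = [i for i, tok in enumerate(input_ids) if tok == special_id]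
--     if not latents:
--         return list(range(n))
--     base = latents[0] - 1
--     out = list(range(latents[0]))
--     bounds = latents + [n]
--     for m in range(len(latents)):
--         start, end = bounds[m], bounds[m + 1]
--         out.extend(range(base + m + 1, base + m + 1 + (end - start)))
--     return out
-- ===== Notes on version B (the rewrite author's own statement) =====
-- stated objective: alternative
-- what changed: Replaces A's single token-by-token pass with a running (latent_count, current_pos) state by a segment decomposition: the latent index list plus a seq_len sentinel defines segments, and the output is built by concatenating one arithmetic range per segment.
import Mathlib
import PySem

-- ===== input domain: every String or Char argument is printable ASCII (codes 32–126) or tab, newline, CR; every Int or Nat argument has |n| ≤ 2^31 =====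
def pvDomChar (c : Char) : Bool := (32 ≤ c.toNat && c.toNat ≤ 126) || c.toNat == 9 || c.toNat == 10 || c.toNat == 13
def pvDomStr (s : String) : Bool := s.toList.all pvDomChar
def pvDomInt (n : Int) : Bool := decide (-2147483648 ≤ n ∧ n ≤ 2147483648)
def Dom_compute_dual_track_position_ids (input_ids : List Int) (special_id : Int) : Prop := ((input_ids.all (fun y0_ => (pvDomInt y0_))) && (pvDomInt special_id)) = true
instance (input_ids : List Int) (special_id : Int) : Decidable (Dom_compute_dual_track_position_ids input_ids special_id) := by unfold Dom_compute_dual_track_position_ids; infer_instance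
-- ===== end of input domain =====

-- B rebuilds the output by concatenating one arithmetic range per latent segment instead of A's single token-by-token pass with a running counter; same return value (alternative decomposition, no speed claim).


-- ===== PORT A =====
-- [i for i, tok in enumerate(input_ids) if tok == special_id]  (shared verbatim by A and B)
def pvLatents (input_ids : List Int) (special_id : Int) : List Int :=
  ((PySem.List.enumerate input_ids 0).filter (fun p => p.2 == special_id)).map Prod.fst

-- the body of A's 'for i in range(first_latent_idx, seq_len)' loop, state (latent_count, current_pos, position_ids)
def stepA (input_ids : List Int) (special_id latent_base : Int)
    (st : Int × Int × List Int) (i : Int) : Int × Int × List Int :=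
  if PySem.List.pyGetD input_ids i 0 == special_id then
    let lc := st.1 + 1
    let p := latent_base + lc
    (lc, p, PySem.List.pySetD st.2.2 i p)
  else
    let p := st.2.1 + 1
    (st.1, p, PySem.List.pySetD st.2.2 i p)

def compute_dual_track_position_ids (input_ids : List Int) (special_id : Int) : List Int :=
  let seq_len : Int := input_ids.length
  let position_ids := PySem.List.pyRange 0 seq_len 1
  let latent_positions := pvLatents input_ids special_id
  if latent_positions.isEmpty then position_ids
  else
    let first_latent_idx := PySem.List.pyGetD latent_positions 0 0
    let latent_base := first_latent_idx - 1
    ((PySem.List.pyRange first_latent_idx seq_len 1).foldl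
        (stepA input_ids special_id latent_base) (0, latent_base, position_ids)).2.2

-- ===== PORT B =====
-- the body of B's 'for m in range(len(latents))' loop: out.extend(range(...)) for segment m
def stepB (bounds : List Int) (base : Int) (out : List Int) (m : Int) : List Int :=
  let start := PySem.List.pyGetD bounds m 0
  let stop := PySem.List.pyGetD bounds (m + 1) 0
  out ++ PySem.List.pyRange (base + m + 1) (base + m + 1 + (stop - start)) 1

def compute_dual_track_position_ids_alt (input_ids : List Int) (special_id : Int) : List Int :=
  let n : Int := input_ids.length
  let latents := pvLatents input_ids special_id
  if latents.isEmpty then PySem.List.pyRange 0 n 1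
  else
    let base := PySem.List.pyGetD latents 0 0 - 1
    let bounds := latents ++ [n]
    (PySem.List.pyRange 0 (latents.length : Int) 1).foldl (stepB bounds base)
      (PySem.List.pyRange 0 (PySem.List.pyGetD latents 0 0) 1)

-- ===== PRECONDITION & SPEC =====
def Spec_compute_dual_track_position_ids (input_ids : List Int) (special_id : Int) (out : List Int) : Prop := out = compute_dual_track_position_ids_alt input_ids special_id
instance (input_ids : List Int) (special_id : Int) (out : List Int) : Decidable (Spec_compute_dual_track_position_ids input_ids special_id out) := by unfold Spec_compute_dual_track_position_ids; infer_instance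

-- ===== CLAIM (what is proved, stated in full; the proofs are below) =====
def Claim_equal_compute_dual_track_position_ids : Prop := ∀ (input_ids : List Int) (special_id : Int), Dom_compute_dual_track_position_ids input_ids special_id → Spec_compute_dual_track_position_ids input_ids special_id (compute_dual_track_position_ids input_ids special_id)

-- ===== LEMMAS AND PROOFS =====

-- indices (from position a) of the tokens equal to s
def latIdx (s : Int) : List Int → Int → List Int
  | [], _ => []
  | t :: ts, a => if t = s then a :: latIdx s ts (a + 1) else latIdx s ts (a + 1)

-- what A's loop writes for the token suffix, given (count, cur)
def buildSeg (s base : Int) : List Int → Int → Int → List Int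
  | [], _, _ => []
  | t :: ts, cnt, cur =>
    if t = s then (base + cnt + 1) :: buildSeg s base ts (cnt + 1) (base + cnt + 1)
    else (cur + 1) :: buildSeg s base ts cnt (cur + 1)

-- B's segment ranges for the latent-index suffix, count cnt, end sentinel e
def segs (base : Int) : List Int → Int → Int → List Int
  | [], _, _ => []
  | i :: rest, cnt, e =>
    PySem.List.pyRange (base + cnt + 1) (base + cnt + 1 + (rest.headD e - i)) 1
      ++ segs base rest (cnt + 1) e

lemma latents_eq (s : Int) : ∀ (ts : List Int) (a : Int),
    ((PySem.List.enumerate ts a).filter (fun p => p.2 == s)).map Prod.fst = latIdx s ts a := by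
  intro ts
  induction ts with
  | nil => intro a; simp [PySem.List.enumerate_nil, latIdx]
  | cons t ts ih =>
    intro a
    by_cases ht : t = s <;>
      simp [PySem.List.enumerate_cons, latIdx, ht, ih (a + 1)]

lemma latIdx_bounds (s : Int) : ∀ (ts : List Int) (a j : Int),
    j ∈ latIdx s ts a → a ≤ j ∧ j < a + ts.length := by
  intro ts
  induction ts with
  | nil => intro a j h; simp [latIdx] at h
  | cons t ts ih =>
    intro a j h
    have hlen : ((t :: ts).length : Int) = (ts.length : Int) + 1 := by simp
    rw [show latIdx s (t :: ts) a
        = if t = s then a :: latIdx s ts (a + 1) else latIdx s ts (a + 1) from rfl] at h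
    split_ifs at h with ht
    · rcases List.mem_cons.mp h with h | h
      · subst h; exact ⟨le_refl _, by rw [hlen]; omega⟩
      · have := ih (a + 1) j h; rw [hlen]; omega
    · have := ih (a + 1) j h; rw [hlen]; omega

lemma latIdx_drop (s : Int) : ∀ (ts : List Int) (k : Nat) (a : Int),
    latIdx s (ts.drop k) (a + k) = (latIdx s ts a).dropWhile (fun j => decide (j < a + k)) := by
  intro ts
  induction ts with
  | nil => intro k a; simp [latIdx]
  | cons t ts ih =>
    intro k a
    cases k with
    | zero =>
      simp only [List.drop_zero, Nat.cast_zero, add_zero]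
      rcases hl : latIdx s (t :: ts) a with _ | ⟨j, rest⟩
      · simp
      · have hj : a ≤ j := by
          have := latIdx_bounds s (t :: ts) a j (by rw [hl]; exact List.mem_cons_self)
          exact this.1
        simp [not_lt.mpr hj]
    | succ k =>
      have h1 : a + ((k : Nat) + 1 : Nat) = (a + 1) + (k : Nat) := by push_cast; ring
      rw [show latIdx s (t :: ts) a
          = if t = s then a :: latIdx s ts (a + 1) else latIdx s ts (a + 1) from rfl]
      rw [List.drop_succ_cons, h1, ih k (a + 1)]
      by_cases ht : t = s
      · have h2 : a < (a + 1) + (k : Nat) := by omega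
        simp [ht, h2]
      · simp [ht]

lemma headD_lb (s : Int) (ts : List Int) (a : Int) :
    a ≤ (latIdx s ts a).headD (a + ts.length) := by
  rcases hl : latIdx s ts a with _ | ⟨j, rest⟩
  · simp
  · have := latIdx_bounds s ts a j (by rw [hl]; exact List.mem_cons_self)
    simpa using this.1

lemma build_eq_segs (s base : Int) : ∀ (ts : List Int) (a cnt cur : Int),
    buildSeg s base ts cnt cur =
      PySem.List.pyRange (cur + 1) (cur + 1 + ((latIdx s ts a).headD (a + ts.length) - a)) 1
        ++ segs base (latIdx s ts a) cnt (a + ts.length) := by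
  intro ts
  induction ts with
  | nil =>
    intro a cnt cur
    simp [buildSeg, latIdx, segs, PySem.List.pyRange_one_eq_nil]
  | cons t ts ih =>
    intro a cnt cur
    have hlen : ((t :: ts).length : Int) = (ts.length : Int) + 1 := by simp
    rw [show latIdx s (t :: ts) a
        = if t = s then a :: latIdx s ts (a + 1) else latIdx s ts (a + 1) from rfl]
    have hhd : (a + 1) ≤ (latIdx s ts (a + 1)).headD ((a + 1) + ts.length) := headD_lb s ts (a + 1)
    by_cases ht : t = s
    · have hb : buildSeg s base (t :: ts) cnt cur
          = (base + cnt + 1) :: buildSeg s base ts (cnt + 1) (base + cnt + 1) := by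
        simp [buildSeg, ht]
      rw [hb, if_pos ht, ih (a + 1) (cnt + 1) (base + cnt + 1)]
      simp only [List.headD_cons, segs, hlen]
      have he : a + ((ts.length : Int) + 1) = (a + 1) + (ts.length : Int) := by ring
      rw [he]
      set h' := (latIdx s ts (a + 1)).headD ((a + 1) + (ts.length : Int)) with hh'
      rw [show cur + 1 + (a - a) = cur + 1 from by ring,
          PySem.List.pyRange_one_eq_nil (le_refl _),
          PySem.List.pyRange_one_cons (by omega : base + cnt + 1 < base + cnt + 1 + (h' - a))]
      simp only [List.nil_append, List.cons_append, List.cons.injEq]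
      refine ⟨trivial, ?_⟩
      have hbd : base + cnt + 1 + 1 + (h' - (a + 1)) = base + cnt + 1 + (h' - a) := by ring
      rw [hbd]
    · have hb : buildSeg s base (t :: ts) cnt cur
          = (cur + 1) :: buildSeg s base ts cnt (cur + 1) := by
        simp [buildSeg, ht]
      rw [hb, if_neg ht, ih (a + 1) cnt (cur + 1)]
      simp only [hlen]
      have he : a + ((ts.length : Int) + 1) = (a + 1) + (ts.length : Int) := by ring
      rw [he]
      set h' := (latIdx s ts (a + 1)).headD ((a + 1) + (ts.length : Int)) with hh'
      rw [PySem.List.pyRange_one_cons (by omega : cur + 1 < cur + 1 + (h' - a))]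
      simp only [List.cons_append, List.cons.injEq]
      refine ⟨trivial, ?_⟩
      have hbd : cur + 1 + 1 + (h' - (a + 1)) = cur + 1 + (h' - a) := by ring
      rw [hbd]

lemma take_set_succ {α : Type} (l : List α) (k : Nat) (v : α) (h : k < l.length) :
    (l.set k v).take (k + 1) = l.take k ++ [v] := by
  induction l generalizing k with
  | nil => simp at h
  | cons x l ih =>
    cases k with
    | zero => simp
    | succ k => simp [List.set_cons_succ, ih k (by simpa using h)]

lemma loopA (xs : List Int) (s base : Int) :
    ∀ (d k : Nat), xs.length - k = d → k ≤ xs.length →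
    ∀ (cnt cur : Int) (pos : List Int), pos.length = xs.length →
    ((PySem.List.pyRange (k : Int) (xs.length : Int) 1).foldl (stepA xs s base) (cnt, cur, pos)).2.2
      = pos.take k ++ buildSeg s base (xs.drop k) cnt cur := by
  intro d
  induction d with
  | zero =>
    intro k hd hk cnt cur pos hlen
    have hk' : k = xs.length := by omega
    subst hk'
    rw [PySem.List.pyRange_one_eq_nil (le_refl _)]
    simp [List.drop_length, buildSeg, List.take_of_length_le (le_of_eq hlen)]
  | succ d ih =>
    intro k hd hk cnt cur pos hlen
    have hklt : k < xs.length := by omega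
    have hcast : ((k : Int) < (xs.length : Int)) := by exact_mod_cast hklt
    rw [PySem.List.pyRange_one_cons hcast, List.foldl_cons]
    have hget : PySem.List.pyGetD xs (k : Int) 0 = xs[k] := by
      rw [PySem.List.pyGetD_natCast, List.getD_eq_getElem xs 0 hklt]
    have hstep1 : ((k : Int) + 1) = ((k + 1 : Nat) : Int) := by push_cast; ring
    have hdrop : xs.drop k = xs[k] :: xs.drop (k + 1) := List.drop_eq_getElem_cons hklt
    by_cases hx : xs[k] = s
    · have hs : stepA xs s base (cnt, cur, pos) (k : Int)
          = (cnt + 1, base + (cnt + 1), pos.set k (base + (cnt + 1))) := by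
        simp [stepA, hget, hx]
      rw [hs, hstep1,
        ih (k + 1) (by omega) (by omega) (cnt + 1) (base + (cnt + 1))
          (pos.set k (base + (cnt + 1))) (by simpa using hlen)]
      rw [take_set_succ pos k _ (by omega), hdrop]
      rw [show buildSeg s base (xs[k] :: xs.drop (k + 1)) cnt cur
          = (base + cnt + 1) :: buildSeg s base (xs.drop (k + 1)) (cnt + 1) (base + cnt + 1) from by
            simp [buildSeg, hx]]
      have hv : base + (cnt + 1) = base + cnt + 1 := by ring
      rw [hv]
      simp
    · have hs : stepA xs s base (cnt, cur, pos) (k : Int)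
          = (cnt, cur + 1, pos.set k (cur + 1)) := by
        simp [stepA, hget, hx]
      rw [hs, hstep1,
        ih (k + 1) (by omega) (by omega) cnt (cur + 1)
          (pos.set k (cur + 1)) (by simpa using hlen)]
      rw [take_set_succ pos k _ (by omega), hdrop]
      rw [show buildSeg s base (xs[k] :: xs.drop (k + 1)) cnt cur
          = (cur + 1) :: buildSeg s base (xs.drop (k + 1)) cnt (cur + 1) from by
            simp [buildSeg, hx]]
      simp

lemma getD_bounds (lat : List Int) (nI : Int) : ∀ (j : Nat), j ≤ lat.length →
    (lat ++ [nI]).getD j 0 = (lat.drop j).headD nI := by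
  intro j h
  induction lat generalizing j with
  | nil => have hj : j = 0 := by simpa using h
           subst hj; simp
  | cons x l ih =>
    cases j with
    | zero => simp
    | succ j => simpa using ih j (by simpa using h)

lemma loopB (lat : List Int) (base nI : Int) :
    ∀ (d m : Nat), lat.length - m = d → m ≤ lat.length → ∀ (out0 : List Int),
    (PySem.List.pyRange (m : Int) (lat.length : Int) 1).foldl (stepB (lat ++ [nI]) base) out0
      = out0 ++ segs base (lat.drop m) (m : Int) nI := by
  intro d
  induction d with
  | zero =>
    intro m hd hm out0
    have hm' : m = lat.length := by omega
    subst hm'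
    rw [PySem.List.pyRange_one_eq_nil (le_refl _)]
    simp [List.drop_length, segs]
  | succ d ih =>
    intro m hd hm out0
    have hmlt : m < lat.length := by omega
    have hcast : ((m : Int) < (lat.length : Int)) := by exact_mod_cast hmlt
    have hstep1 : ((m : Int) + 1) = ((m + 1 : Nat) : Int) := by push_cast; ring
    have hdropm : lat.drop m = lat[m] :: lat.drop (m + 1) := List.drop_eq_getElem_cons hmlt
    have hstart : PySem.List.pyGetD (lat ++ [nI]) (m : Int) 0 = lat[m] := by
      rw [PySem.List.pyGetD_natCast, getD_bounds lat nI m (le_of_lt hmlt), hdropm]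
      rfl
    have hstop : PySem.List.pyGetD (lat ++ [nI]) ((m : Int) + 1) 0 = (lat.drop (m + 1)).headD nI := by
      rw [hstep1, PySem.List.pyGetD_natCast, getD_bounds lat nI (m + 1) (by omega)]
    have hsB : stepB (lat ++ [nI]) base out0 (m : Int)
        = out0 ++ PySem.List.pyRange (base + (m : Int) + 1)
            (base + (m : Int) + 1 + ((lat.drop (m + 1)).headD nI - lat[m])) 1 := by
      simp only [stepB, hstart, hstop]
    rw [PySem.List.pyRange_one_cons hcast, List.foldl_cons, hsB, hstep1,
      ih (m + 1) (by omega) (by omega) _]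
    rw [hdropm]
    rw [show segs base (lat[m] :: lat.drop (m + 1)) (m : Int) nI
        = PySem.List.pyRange (base + (m : Int) + 1)
            (base + (m : Int) + 1 + ((lat.drop (m + 1)).headD nI - lat[m])) 1
          ++ segs base (lat.drop (m + 1)) ((m : Int) + 1) nI from rfl]
    rw [hstep1, List.append_assoc]

-- ===== VERDICT (by name: the statement is the Claim_ definition above) =====
theorem compute_dual_track_position_ids_spec : Claim_equal_compute_dual_track_position_ids := by
  intro xs s _
  unfold Spec_compute_dual_track_position_ids
  have hlat : pvLatents xs s = latIdx s xs 0 := latents_eq s xs 0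
  rcases hL : latIdx s xs 0 with _ | ⟨i, rest⟩
  · simp [compute_dual_track_position_ids, compute_dual_track_position_ids_alt, hlat, hL]
  · have hmem : i ∈ latIdx s xs 0 := by rw [hL]; exact List.mem_cons_self
    have hb := latIdx_bounds s xs 0 i hmem
    have hki : ((i.toNat : Nat) : Int) = i := Int.toNat_of_nonneg hb.1
    set k := i.toNat with hkdef
    have hkn : k < xs.length := by
      have h2 := hb.2
      omega
    have h0 : PySem.List.pyGetD (i :: rest) (0 : Int) 0 = i := by
      rw [show (0 : Int) = ((0 : Nat) : Int) from rfl, PySem.List.pyGetD_natCast]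
      rfl
    have hA : compute_dual_track_position_ids xs s
        = (PySem.List.pyRange 0 (xs.length : Int) 1).take k
            ++ buildSeg s (i - 1) (xs.drop k) 0 (i - 1) := by
      simp only [compute_dual_track_position_ids, hlat, hL, List.isEmpty_cons,
        Bool.false_eq_true, if_false, h0]
      rw [← hki]
      exact loopA xs s ((k : Int) - 1) (xs.length - k) k rfl (le_of_lt hkn) 0 ((k : Int) - 1)
        (PySem.List.pyRange 0 (xs.length : Int) 1)
        (by simp [PySem.List.length_pyRange_one])
    have htk : (PySem.List.pyRange 0 (xs.length : Int) 1).take k = PySem.List.pyRange 0 (k : Int) 1 := by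
      rw [PySem.List.pyRange_one_append 0 (k : Int) (xs.length : Int) (by omega) (by omega)]
      have hlen1 : (PySem.List.pyRange 0 (k : Int) 1).length = k := by
        simp [PySem.List.length_pyRange_one]
      rw [List.take_append_of_le_length (by omega)]
      exact List.take_of_length_le (le_of_eq hlen1)
    have hld : latIdx s (xs.drop k) i = i :: rest := by
      have hdw := latIdx_drop s xs k 0
      rw [hL, show (0 : Int) + (k : Nat) = i from by omega] at hdw
      rw [hdw]
      simp
    have hbuild := build_eq_segs s (i - 1) (xs.drop k) i 0 (i - 1)
    rw [hld] at hbuild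
    simp only [List.headD_cons] at hbuild
    rw [List.length_drop] at hbuild
    rw [show i + ((xs.length - k : Nat) : Int) = (xs.length : Int) from by omega] at hbuild
    rw [show i - 1 + 1 + (i - i) = i from by ring, show i - 1 + 1 = i from by ring] at hbuild
    rw [PySem.List.pyRange_one_eq_nil (le_refl i), List.nil_append] at hbuild
    have hB : compute_dual_track_position_ids_alt xs s
        = PySem.List.pyRange 0 i 1 ++ segs (i - 1) (i :: rest) 0 (xs.length : Int) := by
      simp only [compute_dual_track_position_ids_alt, hlat, hL, List.isEmpty_cons,
        Bool.false_eq_true, if_false, h0]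
      have hlb := loopB (i :: rest) (i - 1) (xs.length : Int) ((i :: rest).length) 0 rfl
        (Nat.zero_le _) (PySem.List.pyRange 0 i 1)
      simpa using hlb
    rw [hA, htk, hki, hbuild, hB]
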